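-- pv_equiv track=rewrite | github.com/CYehLu/hurricane_tools | _generate_README.py | parse_pyfile
-- ===== SOURCE A (Python) =====
-- def parse_one_line_doc(i, content):
--     tri_quote = '"""'
--     line = content[i]
--     doc = line.strip().strip(tri_quote)
--     return i+1, doc
--
-- def parse_multi_line_doc(i, content):
--     tri_quote = '"""'
--     i += 1
--
--     # dealing two types
--     #     def first_type():
--     #         """
--     #         This is the first line of docstring.
--     #         second line
--     #         third line
--     #
--     #         Parameter:
--     #         ...
--     #         """
--     #         pass
--     #
--     #     def second_type():
--     #         """
--     #         This is the first line of docstring.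
--     #         second line
--     #         """
--     #         pass
--
--     doc_list = []
--     while True:
--         line = content[i]
--         if line.strip() and line.strip() != tri_quote:
--             doc_list.append(line.strip())
--             i += 1
--         elif line.strip() and line.strip() == tri_quote:
--             # second type, the end of docstring
--             doc = ' '.join(doc_list)
--             break
--         elif not line.strip():
--             # the blank line in the first type
--             doc = ' '.join(doc_list)
--             break
--
--     return i+1, doc
--
-- def parse_pyfile(content):
--     func_dict = {}    # key: function name, value: function doc-string
--
--     tri_quote = '"""'
--     in_func_scope = False
--     i = 0
--
--     while i < len(content):
--         line = content[i]
--
--         if line.startswith('def'):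
--             func_name = line.split()[1].split('(')[0]
--             #func_name = line.strip('def').strip().strip(':')
--             # move to next line
--             i += 1
--             in_func_scope = True
--             continue
--
--         if in_func_scope and tri_quote in line:
--
--             # determine the docstring is one line or multiple lines
--             # e.g:
--             # def oneline():
--             #     """this is one line docstring"""
--             #     pass
--             # def multi_line():
--             #    """
--             #    this is multiple line docstring
--             #    line2
--             #    line3
--             #    """
--             #    pass
--
--             if line.strip() == tri_quote:
--                 i, doc = parse_multi_line_doc(i, content)
--             else:
--                 i, doc = parse_one_line_doc(i, content)
--
--             func_dict[func_name] = doc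
--             in_func_scope = False
--
--         elif in_func_scope and tri_quote not in line:
--             # no docstring
--             func_dict[func_name] = None
--             in_func_scope = False
--             i += 1
--
--         if not in_func_scope:
--             i += 1
--
--     return func_dict
-- ===== SOURCE B (Python) =====
-- def parse_pyfile(content):
--     # Single structural pass over the lines with explicit state:
--     # pending function name, docstring accumulator, and a skip-next flag.
--     result = {}
--     func_name = None    # set while a def awaits its docstring
--     collecting = None   # list of stripped doc lines inside a multi-line docstring
--     skip = False        # the line after a finished docstring (or a no-doc body line) is consumed unseen
--     for line in content:
--         if skip:
--             skip = False
--             continue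
--         s = line.strip()
--         if collecting is not None:
--             if not s or s == '"""':
--                 result[func_name] = ' '.join(collecting)
--                 collecting = None
--                 func_name = None
--                 skip = True
--             else:
--                 collecting.append(s)
--         elif line.startswith('def'):
--             func_name = line.split()[1].split('(')[0]
--         elif func_name is not None:
--             if '"""' in line:
--                 if s == '"""':
--                     collecting = []
--                 else:
--                     result[func_name] = s.strip('"""')
--                     func_name = None
--                     skip = True
--             else:
--                 result[func_name] = None
--                 func_name = None
--                 skip = True
--     return result
-- ===== Notes on version B (the rewrite author's own statement) =====
-- stated objective: simpler
-- what changed: Replaces A's index-manipulating while-loop with helper sub-parsers, line re-fetches and double increments by a single structural for-pass over the lines with explicit state (pending function name, docstring accumulator, skip-next flag).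
-- outside the precondition, e.g. on parse_pyfile(['def f():', 'x', 'def']): A returns {'f': None}, B returns {'f': None}; on parse_pyfile(['def f():', '"""', '"""', 'x']): A returns {'f': ''}, B returns {'f': ''}
import Mathlib
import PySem

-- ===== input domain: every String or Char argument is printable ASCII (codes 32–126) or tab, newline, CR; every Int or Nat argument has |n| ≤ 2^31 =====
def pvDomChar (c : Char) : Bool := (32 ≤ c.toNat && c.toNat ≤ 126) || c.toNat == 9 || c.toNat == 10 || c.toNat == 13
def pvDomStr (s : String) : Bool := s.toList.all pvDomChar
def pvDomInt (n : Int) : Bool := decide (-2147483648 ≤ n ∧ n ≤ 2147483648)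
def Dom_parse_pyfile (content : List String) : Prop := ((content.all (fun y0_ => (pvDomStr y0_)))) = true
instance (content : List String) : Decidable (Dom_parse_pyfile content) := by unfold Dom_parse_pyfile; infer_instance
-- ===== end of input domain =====

-- B replaces A's index-manipulating scan (with helper sub-parsers and double increments) by a
-- single structural pass with explicit state; objective: simpler.


-- ===== PORT A =====

-- parse_one_line_doc(i, content); none = IndexError on content[i]
def pvParseOneLineDoc (i : Int) (content : List String) : Option (Int × String) :=
  match PySem.List.pyGet? content i with
  | none => none
  | some line => some (i + 1, PySem.Str.stripChars (PySem.Str.strip line) "\"\"\"")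

-- the 'while True' loop of parse_multi_line_doc; none = IndexError (content[i] past the end).
-- A's two break branches ('line.strip() == tri_quote' and 'not line.strip()') both set
-- doc = ' '.join(doc_list) and break, so they are the single else-branch here.
def pvMultiLoop (content : List String) (i : Int) (doc_list : List String) : Nat → Option (Int × String)
  | 0 => none  -- fuel exhaustion: unreachable (i grows strictly, pyGet? fails at content.length)
  | fuel + 1 =>
    match PySem.List.pyGet? content i with
    | none => none
    | some line =>
      if PySem.Str.strip line ≠ "" ∧ PySem.Str.strip line ≠ "\"\"\"" then
        pvMultiLoop content (i + 1) (doc_list ++ [PySem.Str.strip line]) fuel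
      else some (i, PySem.Str.join " " doc_list)

-- parse_multi_line_doc(i, content): i += 1, run the loop, return (i+1, doc)
def pvParseMultiLineDoc (i : Int) (content : List String) : Option (Int × String) :=
  (pvMultiLoop content (i + 1) [] (content.length + 1)).map (fun p => (p.1 + 1, p.2))

-- the main 'while i < len(content)' loop; on an IndexError path the dict built so far is returned
def pvMainLoop (content : List String) (i : Int) (inScope : Bool) (funcName : String)
    (d : PySem.Dict String (Option String)) : Nat → PySem.Dict String (Option String)
  | 0 => d  -- fuel exhaustion: unreachable (i grows strictly each iteration)
  | fuel + 1 =>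
    if i < PySem.List.len content then
      match PySem.List.pyGet? content i with
      | none => d
      | some line =>
        if PySem.Str.startswith line "def" then
          match PySem.List.pyGet? (PySem.Str.split₀ line) 1 with
          | none => d  -- IndexError: line.split()[1]
          | some tok =>
            match PySem.Str.split? tok "(" with
            | none => d  -- unreachable: '(' is not the empty separator
            | some parts =>
              match PySem.List.pyGet? parts 0 with
              | none => d  -- unreachable: str.split never yields []
              | some name => pvMainLoop content (i + 1) true name d fuel
        else if inScope && PySem.Str.isIn "\"\"\"" line then
          match (if PySem.Str.strip line = "\"\"\"" then pvParseMultiLineDoc i content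
                 else pvParseOneLineDoc i content) with
          | none => d  -- IndexError inside the docstring parser
          | some (i', doc) =>
            -- func_dict[func_name] = doc; in_func_scope = False; trailing 'if not in_func_scope: i += 1'
            pvMainLoop content (i' + 1) false funcName (d.insert funcName (some doc)) fuel
        else if inScope && !(PySem.Str.isIn "\"\"\"" line) then
          -- func_dict[func_name] = None; i += 1; trailing 'if not in_func_scope: i += 1'
          pvMainLoop content (i + 1 + 1) false funcName (d.insert funcName none) fuel
        else
          pvMainLoop content (i + 1) inScope funcName d fuel
    else d

def parse_pyfile (content : List String) : List (String × Option String) :=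
  (pvMainLoop content 0 false "" PySem.Dict.empty (content.length + 1)).items

-- ===== PORT B =====

-- B's single for-loop over the lines; result of an IndexError on line.split()[1] = dict so far
def pvBLoop (lines : List String) (result : PySem.Dict String (Option String))
    (funcName : Option String) (collecting : Option (List String)) (skip : Bool) :
    PySem.Dict String (Option String) :=
  match lines with
  | [] => result
  | line :: rest =>
    if skip then pvBLoop rest result funcName collecting false
    else
      match collecting with
      | some acc =>
        if PySem.Str.strip line = "" ∨ PySem.Str.strip line = "\"\"\"" then
          -- collecting is only ever set while a function name is pending, so getD "" never defaults
          pvBLoop rest (result.insert (funcName.getD "") (some (PySem.Str.join " " acc))) none none true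
        else pvBLoop rest result funcName (some (acc ++ [PySem.Str.strip line])) false
      | none =>
        if PySem.Str.startswith line "def" then
          match PySem.List.pyGet? (PySem.Str.split₀ line) 1 with
          | none => result  -- IndexError: line.split()[1]
          | some tok =>
            match PySem.Str.split? tok "(" with
            | none => result
            | some parts =>
              match PySem.List.pyGet? parts 0 with
              | none => result
              | some name => pvBLoop rest result (some name) none false
        else
          match funcName with
          | some fn =>
            if PySem.Str.isIn "\"\"\"" line then
              if PySem.Str.strip line = "\"\"\"" then pvBLoop rest result funcName (some []) false
              else pvBLoop rest (result.insert fn (some (PySem.Str.stripChars (PySem.Str.strip line) "\"\"\""))) none none true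
            else pvBLoop rest (result.insert fn none) none none true
          | none => pvBLoop rest result none none false

def parse_pyfile_alt (content : List String) : List (String × Option String) :=
  (pvBLoop content PySem.Dict.empty none none false).items

-- ===== PRECONDITION & SPEC =====
-- Pre_ excludes the inputs where the Python A raises IndexError: a reached 'def'-prefixed line
-- without a second whitespace token, or an unterminated multi-line docstring (a lone '"""' line
-- that some 'def' line precedes, with no later blank or fence line to stop the collector). Both
-- conditions are conservative closed forms, so they also exclude some inputs on which A still
-- returns (a bad 'def' line that A's double increment skips, or a closing fence that is the last
-- fence of the file); on those excluded-but-returning inputs B behaves exactly like A.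
def Pre_parse_pyfile (content : List String) : Prop :=
  (∀ l ∈ content, PySem.Str.startswith l "def" = true → 2 ≤ (PySem.Str.split₀ l).length) ∧
  (∀ i, ∀ _ : i < content.length,
    (PySem.Str.strip content[i] = "\"\"\"" ∧
      ∃ k, ∃ _ : k < content.length, k < i ∧ PySem.Str.startswith content[k] "def" = true) →
    ∃ j, ∃ _ : j < content.length, i < j ∧
      (PySem.Str.strip content[j] = "" ∨ PySem.Str.strip content[j] = "\"\"\""))
instance (content : List String) : Decidable (Pre_parse_pyfile content) := by
  unfold Pre_parse_pyfile; infer_instance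

def pvWitness_parse_pyfile : List String :=
  ["def f(x):", "    \"\"\"", "    doc line one", "    doc two", "    \"\"\"", "    pass", ""]

def Spec_parse_pyfile (content : List String) (out : List (String × Option String)) : Prop := out = parse_pyfile_alt content
instance (content : List String) (out : List (String × Option String)) : Decidable (Spec_parse_pyfile content out) := by unfold Spec_parse_pyfile; infer_instance

-- ===== CLAIM (what is proved, stated in full; the proofs are below) =====
-- (Pre_ marks where the Python A raises; the two Lean ports happen to agree on every input, since
-- both return the dict built so far on an IndexError path, so the proof below never needs Pre_.)
def Claim_equal_parse_pyfile : Prop := ∀ (content : List String), Dom_parse_pyfile content → Pre_parse_pyfile content → Spec_parse_pyfile content (parse_pyfile content)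

-- ===== LEMMAS AND PROOFS =====

-- B: a skip step just drops one line
lemma pvBLoop_skip (l : List String) (result : PySem.Dict String (Option String)) (fn : Option String)
    (c : Option (List String)) : pvBLoop l result fn c true = pvBLoop (l.drop 1) result fn c false := by
  cases l <;> simp [pvBLoop]

-- reading content[i] (0 ≤ i) succeeds iff drop exposes the line, fails iff drop is empty
lemma pvGet_drop (content : List String) (i : Int) (line : String) (hi : 0 ≤ i)
    (hg : PySem.List.pyGet? content i = some line) :
    content.drop i.toNat = line :: content.drop (i.toNat + 1) := by
  rw [PySem.List.pyGet?_of_nonneg content hi] at hg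
  have hlt : i.toNat < content.length := by
    by_contra hge
    rw [List.getElem?_eq_none (by omega)] at hg
    simp at hg
  rw [List.drop_eq_getElem_cons hlt]
  rw [List.getElem?_eq_getElem hlt] at hg
  simp at hg
  rw [hg]

lemma pvGet_none_drop (content : List String) (i : Int) (hi : 0 ≤ i)
    (hg : PySem.List.pyGet? content i = none) :
    content.drop i.toNat = [] := by
  rw [PySem.List.pyGet?_of_nonneg content hi] at hg
  rw [List.getElem?_eq_none_iff] at hg
  exact List.drop_eq_nil_of_le hg

-- A's inner docstring loop only breaks at a valid index at or after its start
lemma pvMultiLoop_some (content : List String) : ∀ (fuel : Nat) (i : Int) acc jb doc, 0 ≤ i →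
    pvMultiLoop content i acc fuel = some (jb, doc) →
    i ≤ jb ∧ jb < PySem.List.len content := by
  intro fuel
  induction fuel with
  | zero => intro i acc jb doc _ h; simp [pvMultiLoop] at h
  | succ fuel ih =>
    intro i acc jb doc hi h
    rw [pvMultiLoop] at h
    cases hg : PySem.List.pyGet? content i with
    | none => rw [hg] at h; simp at h
    | some line =>
      rw [hg] at h
      dsimp only at h
      by_cases hc : PySem.Str.strip line ≠ "" ∧ PySem.Str.strip line ≠ "\"\"\""
      · rw [if_pos hc] at h
        have := ih (i + 1) (acc ++ [PySem.Str.strip line]) jb doc (by omega) h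
        omega
      · rw [if_neg hc] at h
        simp at h
        obtain ⟨h1, _⟩ := h
        have hr : ¬ (PySem.List.pyGet? content i = none) := by simp [hg]
        rw [PySem.List.pyGet?_eq_none_iff] at hr
        push Not at hr
        unfold PySem.Raise.InRange at hr
        simp [PySem.List.len_eq]
        omega

-- simulation of A's inner docstring loop by B's collecting state
lemma pvMulti_sim (content : List String) (fn : String) : ∀ (fuel : Nat) (i : Int) acc d, 0 ≤ i →
    content.length + 1 ≤ fuel + i.toNat →
    pvBLoop (content.drop i.toNat) d (some fn) (some acc) false =
      (match pvMultiLoop content i acc fuel with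
       | none => d
       | some (jb, doc) =>
           pvBLoop (content.drop (jb.toNat + 2)) (d.insert fn (some doc)) none none false) := by
  intro fuel
  induction fuel with
  | zero =>
    intro i acc d hi hf
    have : content.drop i.toNat = [] := List.drop_eq_nil_of_le (by omega)
    rw [this]
    simp [pvMultiLoop, pvBLoop]
  | succ fuel ih =>
    intro i acc d hi hf
    rw [pvMultiLoop]
    cases hg : PySem.List.pyGet? content i with
    | none =>
      rw [pvGet_none_drop content i hi hg]
      simp [pvBLoop]
    | some line =>
      dsimp only
      rw [pvGet_drop content i line hi hg]
      rw [pvBLoop]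
      rw [if_neg (by simp)]
      by_cases hc : PySem.Str.strip line ≠ "" ∧ PySem.Str.strip line ≠ "\"\"\""
      · rw [if_pos hc, if_neg (by tauto)]
        have := ih (i + 1) (acc ++ [PySem.Str.strip line]) d (by omega) (by omega)
        have he : (i + 1).toNat = i.toNat + 1 := by omega
        rw [he] at this
        exact this
      · rw [if_neg hc, if_pos (by tauto)]
        dsimp only
        rw [pvBLoop_skip, List.drop_drop]
        norm_num

-- simulation of A's main loop by B's pass
lemma pvMain_sim (content : List String) : ∀ (fuel : Nat) (i : Int) (scope : Bool) fn d, 0 ≤ i →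
    content.length + 1 ≤ fuel + i.toNat →
    pvMainLoop content i scope fn d fuel =
      pvBLoop (content.drop i.toNat) d (if scope then some fn else none) none false := by
  intro fuel
  induction fuel with
  | zero =>
    intro i scope fn d hi hf
    have : content.drop i.toNat = [] := List.drop_eq_nil_of_le (by omega)
    rw [this]
    simp [pvMainLoop, pvBLoop]
  | succ fuel ih =>
    intro i scope fn d hi hf
    rw [pvMainLoop]
    by_cases hlt : i < PySem.List.len content
    · rw [if_pos hlt]
      rw [PySem.List.len_eq] at hlt
      cases hg : PySem.List.pyGet? content i with
      | none =>
        exfalso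
        rw [PySem.List.pyGet?_eq_none_iff] at hg
        exact hg (by unfold PySem.Raise.InRange; omega)
      | some line =>
        dsimp only
        rw [pvGet_drop content i line hi hg]
        rw [pvBLoop.eq_def]
        dsimp only
        by_cases hd : PySem.Str.startswith line "def" = true
        · rw [if_pos hd, if_pos hd]
          cases h1 : PySem.List.pyGet? (PySem.Str.split₀ line) 1 with
          | none => rfl
          | some tok =>
            dsimp only
            cases h2 : PySem.Str.split? tok "(" with
            | none => rfl
            | some parts =>
              dsimp only
              cases h3 : PySem.List.pyGet? parts 0 with
              | none => rfl
              | some name =>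
                dsimp only
                have := ih (i + 1) true name d (by omega) (by omega)
                have he : (i + 1).toNat = i.toNat + 1 := by omega
                rw [he] at this
                simpa using this
        · rw [if_neg hd, if_neg hd]
          cases scope with
          | false =>
            rw [if_neg (by simp), if_neg (by simp)]
            have := ih (i + 1) false fn d (by omega) (by omega)
            have he : (i + 1).toNat = i.toNat + 1 := by omega
            rw [he] at this
            simpa using this
          | true =>
            simp only [Bool.true_and, reduceIte]
            by_cases hq : PySem.Str.isIn "\"\"\"" line = true
            · rw [if_pos hq, if_pos hq]
              by_cases hs : PySem.Str.strip line = "\"\"\""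
              · rw [if_pos hs, if_pos hs]
                unfold pvParseMultiLineDoc
                have hB := pvMulti_sim content fn (content.length + 1) (i + 1) [] d (by omega) (by omega)
                have he : (i + 1).toNat = i.toNat + 1 := by omega
                rw [he] at hB
                rw [hB]
                cases hm : pvMultiLoop content (i + 1) [] (content.length + 1) with
                | none => rfl
                | some p =>
                  obtain ⟨jb, doc⟩ := p
                  dsimp only [Option.map]
                  have hjb := pvMultiLoop_some content (content.length + 1) (i + 1) [] jb doc (by omega) hm
                  rw [PySem.List.len_eq] at hjb
                  have := ih (jb + 1 + 1) false fn (d.insert fn (some doc)) (by omega) (by omega)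
                  have he2 : (jb + 1 + 1).toNat = jb.toNat + 2 := by omega
                  rw [he2] at this
                  simpa using this
              · rw [if_neg hs, if_neg hs]
                unfold pvParseOneLineDoc
                rw [hg]
                dsimp only
                rw [pvBLoop_skip, List.drop_drop]
                have hgoal : i.toNat + 1 + 1 = (i + 1 + 1).toNat := by omega
                rw [hgoal]
                simpa using ih (i + 1 + 1) false fn
                  (d.insert fn (some (PySem.Str.stripChars (PySem.Str.strip line) "\"\"\""))) (by omega) (by omega)
            · have hq' : PySem.Str.isIn "\"\"\"" line = false := by
                cases h : PySem.Str.isIn "\"\"\"" line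
                · rfl
                · exact absurd h hq
              rw [if_neg hq, if_pos (by rw [hq']; rfl), if_neg hq]
              rw [pvBLoop_skip, List.drop_drop]
              have hgoal : i.toNat + 1 + 1 = (i + 1 + 1).toNat := by omega
              rw [hgoal]
              simpa using ih (i + 1 + 1) false fn (d.insert fn none) (by omega) (by omega)
    · rw [if_neg hlt]
      rw [PySem.List.len_eq] at hlt
      have : content.drop i.toNat = [] := List.drop_eq_nil_of_le (by omega)
      rw [this]
      rfl

-- ===== VERDICT (by name: the statement is the Claim_ definition above) =====
theorem parse_pyfile_spec : Claim_equal_parse_pyfile := by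
  intro content _ _
  unfold Spec_parse_pyfile parse_pyfile parse_pyfile_alt
  rw [pvMain_sim content (content.length + 1) 0 false "" PySem.Dict.empty (by norm_num) (by simp)]
  simp
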